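-- pv_equiv track=rewrite | github.com/JaydenPahukula/competitive-coding | Kattis/goodmorning.py | check
-- ===== SOURCE A (Python) =====
-- def check(s:str):
--     for i in range(len(s)-1):
--         if s[i] == "0" and s[i+1] not in {"0"}: return False
--         if s[i] == "1" and s[i+1] not in {"1","2","3","4","5","6","7","8","9","0"}: return False
--         if s[i] == "2" and s[i+1] not in {"2","3","5","6","8","9","0"}: return False
--         if s[i] == "3" and s[i+1] not in {"3","6","9"}: return False
--         if s[i] == "4" and s[i+1] not in {"4","5","6","7","8","9","0"}: return False
--         if s[i] == "5" and s[i+1] not in {"5","6","8","9","0"}: return False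
--         if s[i] == "6" and s[i+1] not in {"6","9"}: return False
--         if s[i] == "7" and s[i+1] not in {"7","8","9","0"}: return False
--         if s[i] == "8" and s[i+1] not in {"8","9","0"}: return False
--         if s[i] == "9" and s[i+1] not in {"9"}: return False
--     return True
-- ===== SOURCE B (Python) =====
-- def check(s: str):
--     # Staged approach: A string is valid iff the digits of s form one contiguous
--     # suffix run and, on a phone keypad (0 at row 3, col 1), that run's rows and
--     # columns are each (independently) non-decreasing.  So: find the first digit,
--     # require the rest to be all digits, then compare the row list and the column
--     # list against their sorted versions.
--     digits = "0123456789"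
--     k = len(s)
--     for i, c in enumerate(s):
--         if c in digits:
--             k = i
--             break
--     tail = s[k:]
--     if any(c not in digits for c in tail):
--         return False
--     rows = [3 if c == "0" else (ord(c) - 49) // 3 for c in tail]
--     cols = [1 if c == "0" else (ord(c) - 49) % 3 for c in tail]
--     return rows == sorted(rows) and cols == sorted(cols)
-- ===== Notes on version B (the rewrite author's own statement) =====
-- stated objective: alternative
-- what changed: Instead of scanning adjacent pairs through ten per-digit successor-set branches, B stages the check: locate the first digit, require everything after it to be digits, then map that suffix to keypad rows and columns (0 at row 3, col 1) and accept iff each coordinate list equals its sorted version.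
import Mathlib
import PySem

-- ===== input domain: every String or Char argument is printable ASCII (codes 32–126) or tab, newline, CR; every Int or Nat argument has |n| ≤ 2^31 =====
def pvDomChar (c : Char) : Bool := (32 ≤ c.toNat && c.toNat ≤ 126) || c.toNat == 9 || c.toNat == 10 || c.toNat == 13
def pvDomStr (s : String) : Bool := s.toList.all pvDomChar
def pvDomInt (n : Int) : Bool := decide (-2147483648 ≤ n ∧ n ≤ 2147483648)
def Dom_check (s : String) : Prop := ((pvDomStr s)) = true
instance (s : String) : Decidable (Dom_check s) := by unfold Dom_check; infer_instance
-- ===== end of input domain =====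

-- B replaces A's per-digit successor-table scan by a staged algorithm: find the first
-- digit, require the rest of the string to be all digits, then check the keypad row
-- list and column list each equal their sorted versions; objective: alternative.

-- ===== PORT A =====
-- literal port of A's index loop; `checkGo cs i` is the loop from index i
def checkGo (cs : List Char) (i : Nat) : Bool :=
  if h : i < cs.length - 1 then
    let a := cs[i]'(by omega)
    let b := cs[i+1]'(by omega)
    if a = '0' && !(['0'].contains b) then false
    else if a = '1' && !(['1','2','3','4','5','6','7','8','9','0'].contains b) then false
    else if a = '2' && !(['2','3','5','6','8','9','0'].contains b) then false
    else if a = '3' && !(['3','6','9'].contains b) then false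
    else if a = '4' && !(['4','5','6','7','8','9','0'].contains b) then false
    else if a = '5' && !(['5','6','8','9','0'].contains b) then false
    else if a = '6' && !(['6','9'].contains b) then false
    else if a = '7' && !(['7','8','9','0'].contains b) then false
    else if a = '8' && !(['8','9','0'].contains b) then false
    else if a = '9' && !(['9'].contains b) then false
    else checkGo cs (i+1)
  else true
termination_by cs.length - i

def check (s : String) : Bool := checkGo s.toList 0

-- ===== PORT B =====
-- digits = "0123456789" of Source B, as its character list; `c in digits` is `contains`
def pvDigits : List Char := ['0','1','2','3','4','5','6','7','8','9']

-- the `for i, c in enumerate(s): if c in digits: k = i; break` loop of Source B: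
-- index of the first digit, defaulting to len(s)
def pvFindK : List Char → Nat
  | [] => 0
  | c :: t => if pvDigits.contains c then 0 else pvFindK t + 1

-- 3 if c == "0" else (ord(c) - 49) // 3
def pvRow (c : Char) : Int :=
  if c = '0' then 3 else PySem.Int.floordiv ((c.toNat : Int) - 49) 3
-- 1 if c == "0" else (ord(c) - 49) % 3
def pvCol (c : Char) : Int :=
  if c = '0' then 1 else PySem.Int.mod ((c.toNat : Int) - 49) 3

-- the `if any(...): return False` / rows / cols / return block of Source B, on the tail
def pvTailCheck (tail : List Char) : Bool :=
  if tail.any (fun c => !pvDigits.contains c) then false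
  else
    let rows := tail.map pvRow
    let cols := tail.map pvCol
    decide (rows = PySem.List.sorted rows (fun x => x) false) &&
      decide (cols = PySem.List.sorted cols (fun x => x) false)

def pvCheckAlt (cs : List Char) : Bool :=
  pvTailCheck (cs.drop (pvFindK cs))   -- tail = s[k:], 0 ≤ k ≤ len s (PySem.List.slice_from_natCast)

def check_alt (s : String) : Bool := pvCheckAlt s.toList

-- ===== PRECONDITION & SPEC =====
def Spec_check (s : String) (out : Bool) : Prop := out = check_alt s
instance (s : String) (out : Bool) : Decidable (Spec_check s out) := by unfold Spec_check; infer_instance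

-- ===== CLAIM (what is proved, stated in full; the proofs are below) =====
def Claim_equal_check : Prop := ∀ (s : String), Dom_check s → Spec_check s (check s)

-- ===== LEMMAS AND PROOFS =====

-- A's loop body, factored: the value of one iteration's branch chain (continuation t)
def stepA (a b : Char) (t : Bool) : Bool :=
  if a = '0' && !(['0'].contains b) then false
  else if a = '1' && !(['1','2','3','4','5','6','7','8','9','0'].contains b) then false
  else if a = '2' && !(['2','3','5','6','8','9','0'].contains b) then false
  else if a = '3' && !(['3','6','9'].contains b) then false
  else if a = '4' && !(['4','5','6','7','8','9','0'].contains b) then false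
  else if a = '5' && !(['5','6','8','9','0'].contains b) then false
  else if a = '6' && !(['6','9'].contains b) then false
  else if a = '7' && !(['7','8','9','0'].contains b) then false
  else if a = '8' && !(['8','9','0'].contains b) then false
  else if a = '9' && !(['9'].contains b) then false
  else t

-- one adjacent pair is acceptable (proof-side characterisation)
def pvPairOk (a b : Char) : Bool :=
  !pvDigits.contains a ||
    (pvDigits.contains b && decide (pvRow a ≤ pvRow b) && decide (pvCol a ≤ pvCol b))

def zipAll (cs : List Char) : Bool :=
  (cs.zip cs.tail).all (fun p => pvPairOk p.1 p.2)

theorem not_digit_ne (c : Char) (h : c ∉ pvDigits) :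
    c ≠ '0' ∧ c ≠ '1' ∧ c ≠ '2' ∧ c ≠ '3' ∧ c ≠ '4' ∧
    c ≠ '5' ∧ c ≠ '6' ∧ c ≠ '7' ∧ c ≠ '8' ∧ c ≠ '9' := by
  refine ⟨?_, ?_, ?_, ?_, ?_, ?_, ?_, ?_, ?_, ?_⟩ <;> (rintro rfl; exact h (by decide))

theorem digit_cases (c : Char) :
    c = '0' ∨ c = '1' ∨ c = '2' ∨ c = '3' ∨ c = '4' ∨ c = '5' ∨ c = '6' ∨ c = '7' ∨
    c = '8' ∨ c = '9' ∨ c ∉ pvDigits := by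
  by_cases hm : c ∈ pvDigits
  · simp only [pvDigits, List.mem_cons, List.not_mem_nil, or_false] at hm
    tauto
  · tauto

theorem stepA_eq_pairOk (a b : Char) (t : Bool) : stepA a b t = (pvPairOk a b && t) := by
  by_cases hA : a ∈ pvDigits
  · by_cases hB : b ∈ pvDigits
    · rcases digit_cases a with ha|ha|ha|ha|ha|ha|ha|ha|ha|ha|ha <;>
        rcases digit_cases b with hb|hb|hb|hb|hb|hb|hb|hb|hb|hb|hb <;>
          first
            | exact absurd hA ha
            | exact absurd hB hb
            | (subst_vars; revert t; decide)
    · obtain ⟨b0,b1,b2,b3,b4,b5,b6,b7,b8,b9⟩ := not_digit_ne b hB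
      rcases digit_cases a with ha|ha|ha|ha|ha|ha|ha|ha|ha|ha|ha <;>
        first
          | exact absurd hA ha
          | (subst_vars
             simp [stepA, pvPairOk, pvDigits, b0, b1, b2, b3, b4, b5, b6, b7, b8, b9])
  · obtain ⟨a0,a1,a2,a3,a4,a5,a6,a7,a8,a9⟩ := not_digit_ne a hA
    simp [stepA, pvPairOk, pvDigits, a0, a1, a2, a3, a4, a5, a6, a7, a8, a9]

theorem checkGo_succ (c : Char) (cs : List Char) (i : Nat) :
    checkGo (c :: cs) (i + 1) = checkGo cs i := by
  generalize hn : cs.length - i = n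
  induction n generalizing i with
  | zero =>
    have hL : ¬ (i + 1 < (c :: cs).length - 1) := by simp only [List.length_cons]; omega
    have hR : ¬ (i < cs.length - 1) := by omega
    conv_lhs => rw [checkGo.eq_def]
    conv_rhs => rw [checkGo.eq_def]
    rw [dif_neg hL, dif_neg hR]
  | succ n ih =>
    conv_lhs => rw [checkGo.eq_def]
    conv_rhs => rw [checkGo.eq_def]
    by_cases h : i < cs.length - 1
    · have hL : i + 1 < (c :: cs).length - 1 := by simp only [List.length_cons]; omega
      rw [dif_pos hL, dif_pos h]
      simp only [List.getElem_cons_succ]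
      rw [ih (i + 1) (by omega)]
      rfl
    · have hL : ¬ (i + 1 < (c :: cs).length - 1) := by simp only [List.length_cons]; omega
      rw [dif_neg hL, dif_neg h]

theorem checkGo_eq_zipAll (cs : List Char) : checkGo cs 0 = zipAll cs := by
  induction cs with
  | nil => rw [checkGo.eq_def]; simp [zipAll]
  | cons a cs ih =>
    cases cs with
    | nil => rw [checkGo.eq_def]; simp [zipAll]
    | cons b rest =>
      conv_lhs => rw [checkGo.eq_def]
      rw [dif_pos (by simp)]
      calc _ = stepA a b (checkGo (a :: b :: rest) (0 + 1)) := rfl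
        _ = (pvPairOk a b && checkGo (a :: b :: rest) (0 + 1)) := stepA_eq_pairOk _ _ _
        _ = (pvPairOk a b && checkGo (b :: rest) 0) := by rw [checkGo_succ]
        _ = _ := by rw [ih]; simp [zipAll]

-- a list equals its own sort iff it is pairwise non-decreasing
theorem sortedEq_iff (l : List Int) :
    (l = PySem.List.sorted l (fun x => x) false) ↔ l.Pairwise (· ≤ ·) := by
  constructor
  · intro h
    have := PySem.List.sorted_pairwise (xs := l) (key := fun x => x)
    rw [← h] at this
    simpa using this
  · intro h
    exact (PySem.List.sorted_eq_self_of_pairwise l (fun x => x) (by simpa using h)).symm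

theorem sorted_singleton (x : Int) :
    PySem.List.sorted [x] (fun y => y) false = [x] :=
  PySem.List.sorted_eq_self_of_pairwise [x] (fun y => y) (by simp)

theorem zipAll_two (a b : Char) (u : List Char) :
    zipAll (a :: b :: u) = (pvPairOk a b && zipAll (b :: u)) := by
  simp [zipAll]

-- non-digit characters never constrain: the whole scan skips them
theorem zipAll_cons_nondigit (c : Char) (cs : List Char)
    (h : c ∉ pvDigits) : zipAll (c :: cs) = zipAll cs := by
  cases cs with
  | nil => simp [zipAll]
  | cons b t => simp [zipAll, pvPairOk, h]

theorem findK_cons_nondigit (c : Char) (cs : List Char) (h : c ∉ pvDigits) :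
    pvFindK (c :: cs) = pvFindK cs + 1 := by
  simp [pvFindK, h]

theorem findK_cons_digit (c : Char) (cs : List Char) (h : c ∈ pvDigits) :
    pvFindK (c :: cs) = 0 := by
  simp [pvFindK, h]

-- the heart of the equivalence: on a digit-headed suffix, the pairwise scan is the
-- all-digits test plus per-coordinate sortedness
theorem zipAll_digit (t : List Char) : ∀ a, a ∈ pvDigits →
    zipAll (a :: t) = pvTailCheck (a :: t) := by
  induction t with
  | nil =>
    intro a ha
    simp only [zipAll, pvTailCheck, List.tail_cons, List.zip_nil_right, List.all_nil,
      List.any_cons, List.any_nil, List.map_cons, List.map_nil, Bool.or_false]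
    rw [if_neg (by simp [ha]), Bool.eq_iff_iff]
    simp only [Bool.and_eq_true, decide_eq_true_eq]
    exact iff_of_true trivial ⟨(sorted_singleton _).symm, (sorted_singleton _).symm⟩
  | cons b u ih =>
    intro a ha
    by_cases hb : b ∈ pvDigits
    · rw [zipAll_two, ih b hb]
      unfold pvTailCheck
      by_cases hany : ((b :: u).any (fun c => !pvDigits.contains c)) = true
      · rw [if_pos hany, if_pos (by rw [List.any_cons, hany, Bool.or_true]),
          Bool.and_false]
      · have hany' : ((b :: u).any (fun c => !pvDigits.contains c)) = false := by
          simpa using hany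
        have hanyA : ((a :: b :: u).any (fun c => !pvDigits.contains c)) = false := by
          rw [List.any_cons, hany', Bool.or_false]
          simp [ha]
        rw [if_neg (by rw [hany']; simp), if_neg (by rw [hanyA]; simp)]
        rw [Bool.eq_iff_iff]
        have hpair : pvPairOk a b = (decide (pvRow a ≤ pvRow b) && decide (pvCol a ≤ pvCol b)) := by
          simp [pvPairOk, ha, hb]
        rw [hpair]
        simp only [Bool.and_eq_true, decide_eq_true_eq, List.map_cons]
        rw [sortedEq_iff, sortedEq_iff, sortedEq_iff, sortedEq_iff,
          ← List.isChain_iff_pairwise, ← List.isChain_iff_pairwise,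
          ← List.isChain_iff_pairwise, ← List.isChain_iff_pairwise,
          List.isChain_cons_cons, List.isChain_cons_cons]
        tauto
    · rw [zipAll_two]
      have hp : pvPairOk a b = false := by simp [pvPairOk, ha, hb]
      have hA : pvTailCheck (a :: b :: u) = false := by
        unfold pvTailCheck
        rw [if_pos (by simp [hb])]
      rw [hp, Bool.false_and, hA]

theorem zipAll_eq_pvCheckAlt (cs : List Char) : zipAll cs = pvCheckAlt cs := by
  induction cs with
  | nil => decide
  | cons a t ih =>
    by_cases ha : a ∈ pvDigits
    · rw [pvCheckAlt, findK_cons_digit a t ha, List.drop_zero]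
      exact zipAll_digit t a ha
    · rw [zipAll_cons_nondigit a t ha, ih, pvCheckAlt, pvCheckAlt,
        findK_cons_nondigit a t ha, List.drop_succ_cons]

-- ===== VERDICT (by name: the statement is the Claim_ definition above) =====
theorem check_spec : Claim_equal_check := by
  intro s _
  unfold Spec_check check check_alt
  rw [checkGo_eq_zipAll, zipAll_eq_pvCheckAlt]
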